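-- pv_equiv track=rewrite | github.com/EduBrainBoost/SSID-open-core | 12_tooling/cli/run_gate_pipeline.py | _aggregate_pipeline_decision
-- ===== SOURCE A (Python) =====
-- from typing import Any, Iterator
--
-- _DECISION_RANK = {"PASS": 0, "WARN": 1, "DENY": 2, "ERROR": 3}
--
-- _REMEDIATION_WARN = {"MANUAL_REVIEW", "WARN"}
--
-- _REMEDIATION_PASS = {"AUTO_FIXABLE", "CLEAN", "PASS"}
--
-- def _normalize_status(status: Any) -> str:
--     raw = str(status or "PASS").strip().upper()
--     aliases = {
--         "FAIL": "DENY",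
--         "BLOCKED": "DENY",
--         "HARD_BLOCK": "DENY",
--         "WARNING": "WARN",
--     }
--     return aliases.get(raw, raw or "PASS")
--
-- def _aggregate_pipeline_decision(stage_ledgers: list[dict[str, Any]]) -> tuple[str, str | None]:
--     blocking_stage: str | None = None
--     blocking_rank = -1
--     gate_ledgers = [ledger for ledger in stage_ledgers if ledger["gate_type"] != "remediation_planner"]
--     remediation = next((ledger for ledger in stage_ledgers if ledger["gate_type"] == "remediation_planner"), None)
--
--     for ledger in gate_ledgers:
--         decision = _normalize_status(ledger.get("decision"))
--         if decision == "ERROR":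
--             return "ERROR", ledger["gate_type"]
--         if decision == "DENY" and _DECISION_RANK[decision] > blocking_rank:
--             blocking_stage = ledger["gate_type"]
--             blocking_rank = _DECISION_RANK[decision]
--
--     if blocking_stage:
--         return "DENY", blocking_stage
--
--     if remediation is not None:
--         remediation_decision = _normalize_status(remediation.get("decision"))
--         if remediation_decision == "ERROR":
--             return "ERROR", remediation["gate_type"]
--
--     gate_decisions = {_normalize_status(ledger.get("decision")) for ledger in gate_ledgers}
--     if "WARN" in gate_decisions:
--         return "WARN", next(
--             ledger["gate_type"] for ledger in gate_ledgers if _normalize_status(ledger.get("decision")) == "WARN"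
--         )
--
--     if remediation is not None:
--         rem = _normalize_status(remediation.get("decision"))
--         if rem in _REMEDIATION_WARN:
--             return "WARN", remediation["gate_type"]
--         if rem not in _REMEDIATION_PASS:
--             return "ERROR", remediation["gate_type"]
--
--     return "PASS", None
-- ===== SOURCE B (Python) =====
-- # Single-pass aggregation: one loop records the first ERROR/DENY/WARN gate stage
-- # and the first remediation ledger, then resolves in strict precedence.
--
-- _REMEDIATION_WARN = {"MANUAL_REVIEW", "WARN"}
-- _REMEDIATION_PASS = {"AUTO_FIXABLE", "CLEAN", "PASS"}
--
--
-- def _normalize_status(status):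
--     raw = str(status or "PASS").strip().upper()
--     aliases = {"FAIL": "DENY", "BLOCKED": "DENY", "HARD_BLOCK": "DENY", "WARNING": "WARN"}
--     return aliases.get(raw, raw or "PASS")
--
--
-- def _aggregate_pipeline_decision(stage_ledgers):
--     error_stage = None
--     deny_stage = None
--     warn_stage = None
--     remediation = None
--     for ledger in stage_ledgers:
--         gate = ledger["gate_type"]
--         if gate == "remediation_planner":
--             if remediation is None:
--                 remediation = ledger
--             continue
--         decision = _normalize_status(ledger.get("decision"))
--         if decision == "ERROR" and error_stage is None:
--             error_stage = gate
--         elif decision == "DENY" and deny_stage is None: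
--             deny_stage = gate
--         elif decision == "WARN" and warn_stage is None:
--             warn_stage = gate
--
--     if error_stage is not None:
--         return "ERROR", error_stage
--     if deny_stage:
--         return "DENY", deny_stage
--     rem = _normalize_status(remediation.get("decision")) if remediation is not None else None
--     if rem == "ERROR":
--         return "ERROR", remediation["gate_type"]
--     if warn_stage is not None:
--         return "WARN", warn_stage
--     if rem is not None:
--         if rem in _REMEDIATION_WARN:
--             return "WARN", remediation["gate_type"]
--         if rem not in _REMEDIATION_PASS:
--             return "ERROR", remediation["gate_type"]
--     return "PASS", None
-- ===== Notes on version B (the rewrite author's own statement) =====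
-- stated objective: simpler
-- what changed: A's four sequential scans (a filter, an early-return loop, a set comprehension plus a generator re-scan, and a separate next() for the remediation ledger) are replaced by one loop that records the first ERROR/DENY/WARN gate stage and the remediation ledger, followed by a straight precedence resolution.
import Mathlib
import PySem

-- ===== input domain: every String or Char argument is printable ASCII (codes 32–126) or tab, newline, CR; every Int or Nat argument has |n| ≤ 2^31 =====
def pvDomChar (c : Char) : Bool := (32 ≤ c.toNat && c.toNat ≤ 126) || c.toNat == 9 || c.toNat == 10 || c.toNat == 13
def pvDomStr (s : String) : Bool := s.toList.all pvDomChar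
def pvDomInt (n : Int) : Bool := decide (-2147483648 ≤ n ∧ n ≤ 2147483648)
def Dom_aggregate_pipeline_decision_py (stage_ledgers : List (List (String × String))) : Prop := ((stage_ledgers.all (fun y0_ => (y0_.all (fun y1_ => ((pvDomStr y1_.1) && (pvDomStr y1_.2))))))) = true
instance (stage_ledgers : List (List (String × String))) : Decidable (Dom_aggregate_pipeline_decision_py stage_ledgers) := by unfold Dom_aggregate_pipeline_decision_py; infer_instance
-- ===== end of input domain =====

-- B replaces A's four sequential scans (filter, early-return loop, set comprehension, generator)
-- by ONE pass recording the first ERROR/DENY/WARN gate stage and the remediation ledger, then a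
-- straight precedence resolution; objective: simpler.  Proved: equal return values on Pre_.

-- shared helper of both Pythons: _normalize_status (identical in Source A and Source B)
def normalizeStatus (status : Option String) : String :=
  let s : String := match status with
    | none => "PASS"
    | some t => if t = "" then "PASS" else t   -- str(status or "PASS")
  let raw := PySem.Str.upper (PySem.Str.strip s)
  match (PySem.Dict.mk [("FAIL", "DENY"), ("BLOCKED", "DENY"), ("HARD_BLOCK", "DENY"), ("WARNING", "WARN")]).get? raw with
  | some v => v
  | none => if raw = "" then "PASS" else raw   -- aliases.get(raw, raw or "PASS")

-- ledger["gate_type"]: total form; Pre_ guarantees the key is present (Python raises KeyError otherwise)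
def gateType (l : List (String × String)) : String :=
  ((PySem.Dict.mk l).get? "gate_type").getD ""

-- _normalize_status(ledger.get("decision"))
def normDec (l : List (String × String)) : String :=
  normalizeStatus ((PySem.Dict.mk l).get? "decision")

-- ===== PORT A =====
-- the for-loop over gate_ledgers: early return (ERROR) or final (blocking_stage, blocking_rank)
def pyLoopA : List (List (String × String)) → Option String → Int → (String × Option String) ⊕ (Option String × Int)
  | [], bs, br => .inr (bs, br)
  | l :: rest, bs, br =>
    let decision := normDec l
    if decision = "ERROR" then .inl ("ERROR", some (gateType l))
    else if decision = "DENY" ∧ (2 : Int) > br then pyLoopA rest (some (gateType l)) 2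
    else pyLoopA rest bs br

-- the tail of A after the DENY check: remediation-ERROR, gate_decisions set, WARN, remediation tail
def pyTailA (gate_ledgers : List (List (String × String)))
    (remediation : Option (List (String × String))) : String × Option String :=
  let gate_decisions := PySem.Set.ofList (gate_ledgers.map normDec)
  if "WARN" ∈ gate_decisions then
    ("WARN", (gate_ledgers.find? (fun l => normDec l == "WARN")).map gateType)
  else
    match remediation with
    | some r =>
      let rem := normDec r
      if rem = "MANUAL_REVIEW" ∨ rem = "WARN" then ("WARN", some (gateType r))
      else if ¬(rem = "AUTO_FIXABLE" ∨ rem = "CLEAN" ∨ rem = "PASS") then ("ERROR", some (gateType r))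
      else ("PASS", none)
    | none => ("PASS", none)

def aggregate_pipeline_decision_py (stage_ledgers : List (List (String × String))) : String × Option String :=
  let gate_ledgers := stage_ledgers.filter (fun l => !(gateType l == "remediation_planner"))
  let remediation := stage_ledgers.find? (fun l => gateType l == "remediation_planner")
  match pyLoopA gate_ledgers none (-1) with
  | .inl r => r
  | .inr (blocking_stage, _) =>
    if blocking_stage.getD "" ≠ "" then ("DENY", blocking_stage)   -- 'if blocking_stage:' (truthiness)
    else
      match remediation with
      | some r =>
        if normDec r = "ERROR" then ("ERROR", some (gateType r))
        else pyTailA gate_ledgers remediation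
      | none => pyTailA gate_ledgers remediation

-- ===== PORT B =====
-- one step of B's single loop: state = (error_stage, deny_stage, warn_stage, remediation)
def bStep (st : Option String × Option String × Option String × Option (List (String × String)))
    (l : List (String × String)) :
    Option String × Option String × Option String × Option (List (String × String)) :=
  let (err, deny, warn, rem) := st
  let gate := gateType l
  if gate = "remediation_planner" then
    (err, deny, warn, if rem = none then some l else rem)
  else
    let decision := normDec l
    if decision = "ERROR" ∧ err = none then (some gate, deny, warn, rem)
    else if decision = "DENY" ∧ deny = none then (err, some gate, warn, rem)
    else if decision = "WARN" ∧ warn = none then (err, deny, some gate, rem)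
    else (err, deny, warn, rem)

def aggregate_pipeline_decision_py_alt (stage_ledgers : List (List (String × String))) : String × Option String :=
  let st := stage_ledgers.foldl bStep (none, none, none, none)
  let (err, deny, warn, rem) := st
  if err.isSome then ("ERROR", err)
  else if deny.getD "" ≠ "" then ("DENY", deny)                   -- 'if deny_stage:' (truthiness)
  else
    let remDec := rem.map normDec
    if remDec = some "ERROR" then ("ERROR", rem.map gateType)
    else if warn.isSome then ("WARN", warn)
    else
      match rem, remDec with
      | some r, some rd =>
        if rd = "MANUAL_REVIEW" ∨ rd = "WARN" then ("WARN", some (gateType r))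
        else if ¬(rd = "AUTO_FIXABLE" ∨ rd = "CLEAN" ∨ rd = "PASS") then ("ERROR", some (gateType r))
        else ("PASS", none)
      | _, _ => ("PASS", none)

-- ===== PRECONDITION & SPEC =====
-- Pre_ excludes exactly the inputs where Python A raises KeyError: a ledger without the "gate_type" key.
def Pre_aggregate_pipeline_decision_py (stage_ledgers : List (List (String × String))) : Prop :=
  ∀ l ∈ stage_ledgers, (PySem.Dict.mk l).contains "gate_type" = true
instance (stage_ledgers : List (List (String × String))) : Decidable (Pre_aggregate_pipeline_decision_py stage_ledgers) := by unfold Pre_aggregate_pipeline_decision_py; infer_instance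

def pvWitness_aggregate_pipeline_decision_py : (List (List (String × String))) :=
  [[("gate_type", "lint"), ("decision", "WARN")], [("gate_type", "remediation_planner"), ("decision", "CLEAN")]]

def Spec_aggregate_pipeline_decision_py (stage_ledgers : List (List (String × String))) (out : String × Option String) : Prop := out = aggregate_pipeline_decision_py_alt stage_ledgers
instance (stage_ledgers : List (List (String × String))) (out : String × Option String) : Decidable (Spec_aggregate_pipeline_decision_py stage_ledgers out) := by unfold Spec_aggregate_pipeline_decision_py; infer_instance

-- ===== CLAIM (what is proved, stated in full; the proofs are below) =====
def Claim_equal_aggregate_pipeline_decision_py : Prop := ∀ (stage_ledgers : List (List (String × String))), Dom_aggregate_pipeline_decision_py stage_ledgers → Pre_aggregate_pipeline_decision_py stage_ledgers → Spec_aggregate_pipeline_decision_py stage_ledgers (aggregate_pipeline_decision_py stage_ledgers)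

-- ===== LEMMAS AND PROOFS =====

-- canonical components: first ERROR/DENY/WARN gate stage and the first remediation ledger
def pvGates (sl : List (List (String × String))) : List (List (String × String)) :=
  sl.filter (fun l => !(gateType l == "remediation_planner"))
def pvFirst (sl : List (List (String × String))) (d : String) : Option String :=
  ((pvGates sl).find? (fun l => normDec l == d)).map gateType
def pvRem (sl : List (List (String × String))) : Option (List (String × String)) :=
  sl.find? (fun l => gateType l == "remediation_planner")

theorem foldB_eq (sl : List (List (String × String)))
    (err deny warn : Option String) (rem : Option (List (String × String))) :
    sl.foldl bStep (err, deny, warn, rem) =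
      (err.or (pvFirst sl "ERROR"), deny.or (pvFirst sl "DENY"),
       warn.or (pvFirst sl "WARN"), rem.or (pvRem sl)) := by
  induction sl generalizing err deny warn rem with
  | nil => simp [pvFirst, pvGates, pvRem]
  | cons l sl ih =>
    by_cases hg : gateType l = "remediation_planner"
    · simp only [List.foldl_cons, bStep, hg]
      rw [ih]
      cases rem <;> simp [pvFirst, pvGates, pvRem, hg]
    · simp only [List.foldl_cons, bStep, if_neg hg]
      by_cases hE : normDec l = "ERROR" <;> by_cases hD : normDec l = "DENY" <;>
        by_cases hW : normDec l = "WARN" <;>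
        cases err <;> cases deny <;> cases warn <;>
        simp_all [pvFirst, pvGates, pvRem]

theorem loopA_some (l : List (List (String × String))) (g : String) :
    pyLoopA l (some g) 2 =
      match l.find? (fun x => normDec x == "ERROR") with
      | some x => .inl ("ERROR", some (gateType x))
      | none => .inr (some g, 2) := by
  induction l with
  | nil => rfl
  | cons x l ih =>
    by_cases hE : normDec x = "ERROR" <;> simp [pyLoopA, hE, ih]

theorem loopA_none (l : List (List (String × String))) :
    pyLoopA l none (-1) =
      match l.find? (fun x => normDec x == "ERROR") with
      | some x => .inl ("ERROR", some (gateType x))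
      | none =>
        .inr ((l.find? (fun x => normDec x == "DENY")).map gateType,
              if ((l.find? (fun x => normDec x == "DENY")).isSome) then 2 else -1) := by
  induction l with
  | nil => rfl
  | cons x l ih =>
    by_cases hE : normDec x = "ERROR" <;> by_cases hD : normDec x = "DENY" <;>
      simp [pyLoopA, hE, hD, ih, loopA_some]

-- ===== VERDICT (by name: the statement is the Claim_ definition above) =====
theorem aggregate_pipeline_decision_py_spec : Claim_equal_aggregate_pipeline_decision_py := by
  intro sl _hDom _hPre
  unfold Spec_aggregate_pipeline_decision_py
  unfold aggregate_pipeline_decision_py aggregate_pipeline_decision_py_alt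
  rw [foldB_eq]
  simp only [Option.none_or]
  rw [show (sl.filter (fun l => !(gateType l == "remediation_planner"))) = pvGates sl from rfl]
  rw [show (sl.find? (fun l => gateType l == "remediation_planner")) = pvRem sl from rfl]
  rw [loopA_none]
  cases hE : (pvGates sl).find? (fun x => normDec x == "ERROR") with
  | some x => simp [pvFirst, hE]
  | none =>
    simp only [pvFirst, hE, Option.map_none]
    cases hD : (pvGates sl).find? (fun x => normDec x == "DENY") with
    | some y =>
      by_cases hy : gateType y = ""
      · simp [hy, pyTailA]
        cases hR : pvRem sl <;> simp
      · simp [hy]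
    | none =>
      simp only [Option.map_none, Option.getD_none, ne_eq, not_true_eq_false, if_false,
        Option.isSome_none, Bool.false_eq_true]
      cases hR : pvRem sl with
      | none =>
        simp [pyTailA]
      | some r =>
        by_cases hre : normDec r = "ERROR"
        · simp [hre]
        · simp [pyTailA, hre]
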